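-- pv_equiv track=rewrite | github.com/FarhadManiCodes/flake8_patterns | src/flake8_patterns/rules/assignment_patterns.py | _has_consecutive_subsequence
-- ===== SOURCE A (Python) =====
-- def _has_consecutive_subsequence(indices: list[int]) -> bool:
--     """Check if there's a consecutive subsequence of length >= 2."""
--     if len(indices) < 2:
--         return False
--
--     indices_set = set(indices)
--
--     # Look for consecutive sequences
--     for start_idx in indices_set:
--         consecutive_count = 0
--         current_idx = start_idx
--
--         # Count consecutive indices starting from start_idx
--         while current_idx in indices_set:
--             consecutive_count += 1
--             current_idx += 1
--
--         # If we found a consecutive sequence of 2 or more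
--         if consecutive_count >= 2:
--             return True
--
--     return False
-- ===== SOURCE B (Python) =====
-- def _has_consecutive_subsequence(indices: list[int]) -> bool:
--     """Check if there's a consecutive subsequence of length >= 2."""
--     s = sorted(indices)
--     return any(b - a == 1 for a, b in zip(s, s[1:]))
-- ===== Notes on version B (the rewrite author's own statement) =====
-- stated objective: idiomatic
-- what changed: Replaces the set-based upward run-walk from every element with a sort followed by a single adjacent-pair scan (any diff == 1).
import Mathlib
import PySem

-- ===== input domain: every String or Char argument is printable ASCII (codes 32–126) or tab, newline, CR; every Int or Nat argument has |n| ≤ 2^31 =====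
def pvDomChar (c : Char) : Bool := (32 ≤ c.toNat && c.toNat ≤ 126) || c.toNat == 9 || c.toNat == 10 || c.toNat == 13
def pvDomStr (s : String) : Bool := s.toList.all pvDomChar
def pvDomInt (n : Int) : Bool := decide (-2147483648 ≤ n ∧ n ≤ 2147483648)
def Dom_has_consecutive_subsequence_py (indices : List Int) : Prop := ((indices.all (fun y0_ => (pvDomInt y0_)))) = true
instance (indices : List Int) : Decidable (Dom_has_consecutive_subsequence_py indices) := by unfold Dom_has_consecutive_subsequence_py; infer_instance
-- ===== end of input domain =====

-- B replaces A's set-based run-walk by sort + adjacent-pair scan (idiomatic; not claimed faster).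

-- ===== PORT A =====
-- the inner 'while current_idx in indices_set' loop; fuel = size of the set bounds the
-- number of iterations (a consecutive run inside a duplicate-free list has ≤ its length elements)
def pvCountConsec (s : List Int) : Int → Nat → Nat
  | _, 0 => 0
  | x, f+1 => if PySem.Set.contains s x then pvCountConsec s (x+1) f + 1 else 0

def has_consecutive_subsequence_py (indices : List Int) : Bool :=
  if indices.length < 2 then false
  else
    let s := PySem.Set.ofList indices
    -- for-loop with early 'return True' = any; order over the set does not matter here
    s.any (fun start => decide (2 ≤ pvCountConsec s start s.length))

-- ===== PORT B =====
def has_consecutive_subsequence_py_alt (indices : List Int) : Bool :=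
  let s := PySem.List.sorted indices (fun x => x) false
  (s.zip (s.drop 1)).any (fun p => p.2 - p.1 == 1)

-- ===== PRECONDITION & SPEC =====
def Spec_has_consecutive_subsequence_py (indices : List Int) (out : Bool) : Prop := out = has_consecutive_subsequence_py_alt indices
instance (indices : List Int) (out : Bool) : Decidable (Spec_has_consecutive_subsequence_py indices out) := by unfold Spec_has_consecutive_subsequence_py; infer_instance

-- ===== CLAIM (what is proved, stated in full; the proofs are below) =====
def Claim_equal_has_consecutive_subsequence_py : Prop := ∀ (indices : List Int), Dom_has_consecutive_subsequence_py indices → Spec_has_consecutive_subsequence_py indices (has_consecutive_subsequence_py indices)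

-- ===== LEMMAS AND PROOFS =====

theorem countConsec_ge_two (s : List Int) (x : Int) (f : Nat) (hf : 2 ≤ f) :
    2 ≤ pvCountConsec s x f ↔ (x ∈ s ∧ x + 1 ∈ s) := by
  obtain ⟨f', rfl⟩ : ∃ f', f = f' + 2 := ⟨f - 2, by omega⟩
  simp only [pvCountConsec, PySem.Set.contains, List.contains_eq_mem, decide_eq_true_eq]
  by_cases hx : x ∈ s <;> by_cases hx1 : x + 1 ∈ s <;> simp [hx, hx1]

theorem length_ge_two_of_mem_mem (l : List Int) (x : Int) (hx : x ∈ l) (hx1 : x + 1 ∈ l) :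
    2 ≤ l.length := by
  match l with
  | [] => cases hx
  | [a] =>
    simp only [List.mem_singleton] at hx hx1
    omega
  | a :: b :: t => simp

theorem A_iff (indices : List Int) :
    has_consecutive_subsequence_py indices = true ↔ ∃ x, x ∈ indices ∧ x + 1 ∈ indices := by
  unfold has_consecutive_subsequence_py
  by_cases hlen : indices.length < 2
  · simp only [hlen, if_true, Bool.false_eq_true, false_iff]
    rintro ⟨x, hx, hx1⟩
    exact absurd (length_ge_two_of_mem_mem indices x hx hx1) (by omega)
  · simp only [hlen, if_false, List.any_eq_true, decide_eq_true_eq]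
    constructor
    · rintro ⟨start, hstart, hcnt⟩
      by_cases hs2 : 2 ≤ (PySem.Set.ofList indices).length
      · have := (countConsec_ge_two _ start _ hs2).mp hcnt
        exact ⟨start, (PySem.Set.mem_ofList _ _).mp this.1, (PySem.Set.mem_ofList _ _).mp this.2⟩
      · -- the set has < 2 elements: the count can never reach 2
        exfalso
        have hle : ∀ (x : Int) (f : Nat), pvCountConsec (PySem.Set.ofList indices) x f ≤ f := by
          intro x f
          induction f generalizing x with
          | zero => simp [pvCountConsec]
          | succ n ih =>
            simp only [pvCountConsec]
            split
            · have := ih (x + 1); omega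
            · omega
        have := hle start (PySem.Set.ofList indices).length
        omega
    · rintro ⟨x, hx, hx1⟩
      have hxs : x ∈ PySem.Set.ofList indices := (PySem.Set.mem_ofList _ _).mpr hx
      have hx1s : x + 1 ∈ PySem.Set.ofList indices := (PySem.Set.mem_ofList _ _).mpr hx1
      have hs2 : 2 ≤ (PySem.Set.ofList indices).length :=
        length_ge_two_of_mem_mem _ x hxs hx1s
      exact ⟨x, hxs, (countConsec_ge_two _ x _ hs2).mpr ⟨hxs, hx1s⟩⟩

theorem adj_pair_of_mem (s : List Int) (hs : s.Pairwise (· ≤ ·)) (x : Int)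
    (hx : x ∈ s) (hx1 : x + 1 ∈ s) :
    ∃ p ∈ s.zip (s.drop 1), p.2 - p.1 = 1 := by
  induction s with
  | nil => cases hx
  | cons a t ih =>
    have ha : ∀ y ∈ t, a ≤ y := (List.pairwise_cons.mp hs).1
    have ht : t.Pairwise (· ≤ ·) := (List.pairwise_cons.mp hs).2
    by_cases hxt : x ∈ t
    · by_cases hx1t : x + 1 ∈ t
      · obtain ⟨p, hp, hd⟩ := ih ht hxt hx1t
        cases t with
        | nil => cases hxt
        | cons b t' =>
          refine ⟨p, ?_, hd⟩
          simp only [List.drop_succ_cons, List.drop_zero, List.zip_cons_cons] at hp ⊢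
          exact List.mem_cons_of_mem _ hp
      · have hax : a = x + 1 := by
          rcases List.mem_cons.mp hx1 with h | h
          · exact h.symm
          · exact absurd h hx1t
        have := ha x hxt
        omega
    · have hax : a = x := by
        rcases List.mem_cons.mp hx with h | h
        · exact h.symm
        · exact absurd h hxt
      have hx1t : x + 1 ∈ t := by
        rcases List.mem_cons.mp hx1 with h | h
        · omega
        · exact h
      cases t with
      | nil => cases hx1t
      | cons b t' =>
        have hb1 : b ≤ x + 1 := by
          rcases List.mem_cons.mp hx1t with h | h
          · omega
          · have := ha (x + 1) hx1t
            exact (List.pairwise_cons.mp ht).1 _ h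
        have hab : a ≤ b := ha b (List.mem_cons_self ..)
        have hbx : b ≠ x := fun h => hxt (h ▸ List.mem_cons_self ..)
        refine ⟨(a, b), ?_, by omega⟩
        simp

theorem B_iff (indices : List Int) :
    has_consecutive_subsequence_py_alt indices = true ↔ ∃ x, x ∈ indices ∧ x + 1 ∈ indices := by
  unfold has_consecutive_subsequence_py_alt
  simp only [List.any_eq_true, beq_iff_eq]
  constructor
  · rintro ⟨⟨a, b⟩, hp, hd⟩
    have h1 : a ∈ PySem.List.sorted indices (fun x => x) false := (List.of_mem_zip hp).1
    have h2 : b ∈ PySem.List.sorted indices (fun x => x) false :=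
      List.mem_of_mem_drop (List.of_mem_zip hp).2
    refine ⟨a, (PySem.List.mem_sorted ..).mp h1, ?_⟩
    have : b = a + 1 := by omega
    exact this ▸ (PySem.List.mem_sorted ..).mp h2
  · rintro ⟨x, hx, hx1⟩
    obtain ⟨p, hp, hd⟩ := adj_pair_of_mem (PySem.List.sorted indices (fun x => x) false)
      (PySem.List.sorted_pairwise ..) x
      ((PySem.List.mem_sorted ..).mpr hx) ((PySem.List.mem_sorted ..).mpr hx1)
    exact ⟨p, hp, hd⟩

-- ===== VERDICT (by name: the statement is the Claim_ definition above) =====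
theorem has_consecutive_subsequence_py_spec : Claim_equal_has_consecutive_subsequence_py := by
  intro indices _
  unfold Spec_has_consecutive_subsequence_py
  rw [Bool.eq_iff_iff, A_iff, B_iff]
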